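-- pv_equiv track=rewrite | github.com/maksverver/AdventOfCode | 2022/06.py | FindDistinct
-- ===== SOURCE A (Python) =====
-- def FindDistinct(s, k):
--   'Returns the first index i in s so that s[i - k:i] are all distinct.'
--
--   char_count = {}
--
--   def Add(ch):
--     if ch not in char_count:
--       char_count[ch] = 1
--     else:
--       char_count[ch] += 1
--
--   def Remove(ch):
--     char_count[ch] -= 1
--     if char_count[ch] == 0:
--       del char_count[ch]
--
--   for i, ch in enumerate(s):
--     Add(ch)
--     if i >= k:
--       Remove(s[i - k])
--     if len(char_count) == k:
--       return i + 1
-- ===== SOURCE B (Python) =====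
-- def FindDistinct(s, k):
--   'Returns the first index i in s so that s[i - k:i] are all distinct.'
--   for i in range(len(s)):
--     window = s[max(0, i - k + 1):i + 1]
--     if len(set(window)) == k:
--       return i + 1
--   return None
-- ===== Notes on version B (the rewrite author's own statement) =====
-- stated objective: simpler
-- what changed: Replaces the incrementally maintained character-count dict (with Add/Remove helpers) by a stateless per-index rescan that slices the clamped k-window and compares len(set(window)) to k.
import Mathlib
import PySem

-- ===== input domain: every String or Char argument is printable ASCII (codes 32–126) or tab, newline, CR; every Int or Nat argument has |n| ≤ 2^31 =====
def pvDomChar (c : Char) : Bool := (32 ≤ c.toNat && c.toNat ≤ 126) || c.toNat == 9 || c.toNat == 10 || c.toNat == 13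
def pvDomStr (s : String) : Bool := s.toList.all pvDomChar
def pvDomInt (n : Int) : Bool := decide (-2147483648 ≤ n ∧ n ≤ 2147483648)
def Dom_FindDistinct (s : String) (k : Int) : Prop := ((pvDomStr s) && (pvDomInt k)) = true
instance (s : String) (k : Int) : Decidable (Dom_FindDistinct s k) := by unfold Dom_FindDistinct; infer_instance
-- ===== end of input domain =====

-- B replaces A's incrementally maintained count dict by a stateless per-index rescan of the
-- clamped k-window (simpler); equivalence is proved for k ≥ 0 (plus empty s), A raises otherwise.

-- ===== PORT A =====
-- Python helper Add: if ch not in char_count: char_count[ch] = 1 else: char_count[ch] += 1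
def aAdd (d : PySem.Dict Char Int) (ch : Char) : PySem.Dict Char Int :=
  if d.contains ch = false then d.insert ch 1 else d.modify ch 0 (· + 1)

-- Python helper Remove: char_count[ch] -= 1; if char_count[ch] == 0: del char_count[ch]
-- (none = KeyError when ch is not a key; excluded by Pre_)
def aRemove (d : PySem.Dict Char Int) (ch : Char) : Option (PySem.Dict Char Int) :=
  if d.contains ch then
    let d' := d.modify ch 0 (· - 1)
    some (if d'.getD ch 0 = 0 then d'.erase ch else d')
  else none

-- the 'for i, ch in enumerate(s)' loop, carrying char_count (none also stands for an exception
-- raised by s[i - k] / Remove; such inputs are excluded by Pre_)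
def aLoop (chars : List Char) (k : Int) : List (Int × Char) → PySem.Dict Char Int → Option Int
  | [], _ => none
  | (i, ch) :: rest, d =>
    let d1 := aAdd d ch
    let d2? : Option (PySem.Dict Char Int) :=
      if k ≤ i then
        match PySem.List.pyGet? chars (i - k) with
        | none => none
        | some c => aRemove d1 c
      else some d1
    match d2? with
    | none => none
    | some d2 => if (d2.size : Int) = k then some (i + 1) else aLoop chars k rest d2

def FindDistinct (s : String) (k : Int) : Option Int :=
  aLoop s.toList k (PySem.List.enumerate s.toList 0) PySem.Dict.empty

-- ===== PORT B =====
-- the 'for i in range(len(s))' loop of Source B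
def bLoop (chars : List Char) (k : Int) : List Int → Option Int
  | [] => none
  | i :: rest =>
    let window := PySem.List.slice chars (some (max 0 (i - k + 1))) (some (i + 1))
    if ((PySem.Set.ofList window).length : Int) = k then some (i + 1) else bLoop chars k rest

def FindDistinct_alt (s : String) (k : Int) : Option Int :=
  bLoop s.toList k (PySem.List.pyRange 0 (s.toList.length : Int) 1)

-- ===== PRECONDITION & SPEC =====
-- Pre_ excludes exactly the inputs on which A raises: for every non-empty s with k < 0 the
-- Remove/indexing machinery raises KeyError or IndexError before the loop can finish.
def Pre_FindDistinct (s : String) (k : Int) : Prop := s = "" ∨ 0 ≤ k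
instance (s : String) (k : Int) : Decidable (Pre_FindDistinct s k) := by unfold Pre_FindDistinct; infer_instance
def pvWitness_FindDistinct : String × Int := ("abcab", 3)

def Spec_FindDistinct (s : String) (k : Int) (out : Option Int) : Prop := out = FindDistinct_alt s k
instance (s : String) (k : Int) (out : Option Int) : Decidable (Spec_FindDistinct s k out) := by unfold Spec_FindDistinct; infer_instance

-- ===== CLAIM (what is proved, stated in full; the proofs are below) =====
def Claim_equal_FindDistinct : Prop := ∀ (s : String) (k : Int), Dom_FindDistinct s k → Pre_FindDistinct s k → Spec_FindDistinct s k (FindDistinct s k)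

-- ===== LEMMAS AND PROOFS =====

-- the invariant: char_count maps each char to its positive count in the current window, no zero entries
def InvCC (d : PySem.Dict Char Int) (w : List Char) : Prop :=
  d.keys.Nodup ∧ ∀ x : Char, d.get? x = if 0 < w.count x then some ((w.count x : Nat) : Int) else none

theorem find?_filter_ne_pv (l : List (Char × Int)) (c x : Char) (hx : x ≠ c) :
    (l.filter (fun p => !(p.1 == c))).find? (fun p => p.1 == x)
      = l.find? (fun p => p.1 == x) := by
  induction l with
  | nil => rfl
  | cons p rest ih =>
    obtain ⟨a, v⟩ := p
    by_cases hac : a = c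
    · subst hac
      rw [List.filter_cons, if_neg (by simp),
        List.find?_cons_of_neg (by simpa using fun h : a = x => hx h.symm)]
      exact ih
    · rw [List.filter_cons, if_pos (by simpa using hac)]
      by_cases hax : a = x
      · subst hax
        rw [List.find?_cons_of_pos (by simp), List.find?_cons_of_pos (by simp)]
      · rw [List.find?_cons_of_neg (by simpa using hax),
          List.find?_cons_of_neg (by simpa using hax)]
        exact ih

theorem get?_erase_pv (d : PySem.Dict Char Int) (c x : Char) :
    (d.erase c).get? x = if x = c then none else d.get? x := by
  by_cases hx : x = c
  · subst hx
    rw [if_pos rfl]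
    have hfind : (d.items.filter (fun p => !(p.1 == x))).find? (fun p => p.1 == x) = none := by
      apply List.find?_eq_none.mpr
      intro p hp
      have := (List.mem_filter.mp hp).2
      simpa using this
    simp [PySem.Dict.erase, PySem.Dict.get?, hfind]
  · rw [if_neg hx]
    simp [PySem.Dict.erase, PySem.Dict.get?, find?_filter_ne_pv d.items c x hx]

theorem keys_erase_sublist_pv (d : PySem.Dict Char Int) (c : Char) :
    (d.erase c).keys.Sublist d.keys :=
  List.Sublist.map _ List.filter_sublist

theorem nodup_keys_erase_pv (d : PySem.Dict Char Int) (c : Char) (h : d.keys.Nodup) :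
    (d.erase c).keys.Nodup :=
  h.sublist (keys_erase_sublist_pv d c)

-- Inv fixes the size of the dict: it is the number of distinct chars in the window
theorem size_eq_pv (d : PySem.Dict Char Int) (w : List Char) (h : InvCC d w) :
    d.size = (PySem.Set.ofList w).length := by
  obtain ⟨hnd, hI⟩ := h
  have hmem : ∀ x : Char, x ∈ d.keys ↔ x ∈ PySem.Set.ofList w := by
    intro x
    rw [PySem.Set.mem_ofList]
    constructor
    · intro hx
      by_contra hw
      have hc : w.count x = 0 := List.count_eq_zero.mpr hw
      have hnone : d.get? x = none := by rw [hI x, hc]; simp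
      exact ((PySem.Dict.get?_eq_none_iff_not_mem_keys d x).mp hnone) hx
    · intro hw
      by_contra hx
      have : d.get? x = none := (PySem.Dict.get?_eq_none_iff_not_mem_keys d x).mpr hx
      rw [hI x] at this
      have hc : 0 < w.count x := List.count_pos_iff.mpr hw
      simp [hc] at this
  have hperm : d.keys.Perm (PySem.Set.ofList w) :=
    (List.perm_ext_iff_of_nodup hnd (PySem.Set.nodup_ofList w)).mpr hmem
  have : d.keys.length = (PySem.Set.ofList w).length := hperm.length_eq
  simpa [PySem.Dict.size, PySem.Dict.keys] using this

-- Add appends one occurrence to the window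
theorem add_pres_pv (d : PySem.Dict Char Int) (w : List Char) (c : Char) (h : InvCC d w) :
    InvCC (aAdd d c) (w ++ [c]) := by
  obtain ⟨hnd, hI⟩ := h
  have hcont : d.contains c = decide (0 < w.count c) := by
    rw [PySem.Dict.contains_eq_isSome_get?, hI c]
    by_cases hc : 0 < w.count c <;> simp [hc]
  have hins : aAdd d c = d.insert c ((((w ++ [c]).count c : Nat)) : Int) := by
    unfold aAdd
    by_cases hc : 0 < w.count c
    · have h1 : d.contains c = true := by simp [hcont, hc]
      rw [if_neg (by simp [h1])]
      show d.modify c 0 (· + 1) = _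
      have : d.getD c 0 = ((w.count c : Nat) : Int) := by
        rw [PySem.Dict.getD_eq_get?_getD, hI c, if_pos hc]; rfl
      simp [PySem.Dict.modify, this, List.count_append, List.count_cons]
    · have h1 : d.contains c = false := by simp [hcont, hc]
      rw [if_pos (by simp [h1])]
      have : w.count c = 0 := by omega
      simp [List.count_append, this]
  rw [hins]
  constructor
  · exact PySem.Dict.nodup_keys_insert d c _ hnd
  · intro x
    rw [PySem.Dict.get?_insert]
    by_cases hx : x = c
    · subst hx
      rw [if_pos rfl]
      have h1 : 0 < (w ++ [x]).count x := by
        rw [List.count_append]; simp [List.count_cons]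
      rw [if_pos h1]
    · have hcc : (w ++ [c]).count x = w.count x := by
        rw [List.count_append, List.count_cons, List.count_nil,
          if_neg (by simpa using fun h : c = x => hx h.symm)]
        omega
      rw [if_neg hx, hI x, hcc]

-- Remove deletes one occurrence of the window's head
theorem remove_pres_pv (d : PySem.Dict Char Int) (r : Char) (w' : List Char)
    (h : InvCC d (r :: w')) :
    ∃ d2, aRemove d r = some d2 ∧ InvCC d2 w' := by
  obtain ⟨hnd, hI⟩ := h
  have hcnt : 0 < (r :: w').count r := by simp [List.count_cons]
  have hget : d.get? r = some (((r :: w').count r : Nat) : Int) := by rw [hI r, if_pos hcnt]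
  have hcont : d.contains r = true := by
    rw [PySem.Dict.contains_eq_isSome_get?, hget]; rfl
  have hgetD : d.getD r 0 = (((r :: w').count r : Nat) : Int) := by
    rw [PySem.Dict.getD_eq_get?_getD, hget]; rfl
  have hmod : d.modify r 0 (· - 1) = d.insert r ((((r :: w').count r : Nat) : Int) - 1) := by
    simp [PySem.Dict.modify, hgetD]
  have hcount : (r :: w').count r = w'.count r + 1 := by simp [List.count_cons]
  have hgd : (d.modify r 0 (· - 1)).getD r 0 = ((w'.count r : Nat) : Int) := by
    rw [hmod, PySem.Dict.getD_eq_get?_getD, PySem.Dict.get?_insert]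
    simp [hcount]
  unfold aRemove
  rw [if_pos hcont]
  by_cases hz : w'.count r = 0
  · -- count drops to zero: the key is deleted
    refine ⟨_, rfl, ?_⟩
    rw [if_pos (by rw [hgd, hz]; simp)]
    constructor
    · exact nodup_keys_erase_pv _ r (by rw [hmod]; exact PySem.Dict.nodup_keys_insert d r _ hnd)
    · intro x
      rw [get?_erase_pv]
      by_cases hx : x = r
      · subst hx; rw [if_pos rfl, hz]; simp
      · have hcc : (r :: w').count x = w'.count x := by
          rw [List.count_cons, if_neg (by simpa using fun h : r = x => hx h.symm)]
          omega
        rw [if_neg hx, hmod, PySem.Dict.get?_insert, if_neg hx, hI x, hcc]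
  · -- count stays positive
    refine ⟨_, rfl, ?_⟩
    rw [if_neg (by rw [hgd]; simpa using hz)]
    constructor
    · rw [hmod]; exact PySem.Dict.nodup_keys_insert d r _ hnd
    · intro x
      rw [hmod, PySem.Dict.get?_insert]
      by_cases hx : x = r
      · subst hx
        have : 0 < w'.count x := by omega
        rw [if_pos rfl, if_pos this, hcount]
        push_cast; ring_nf
      · have hcc : (r :: w').count x = w'.count x := by
          rw [List.count_cons, if_neg (by simpa using fun h : r = x => hx h.symm)]
          omega
        rw [if_neg hx, hI x, hcc]

-- the window after processing m chars
def win (chars : List Char) (K m : Nat) : List Char := (chars.take m).drop (m - K)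

theorem win_succ_lt (chars : List Char) (K m : Nat) (hm : m < chars.length) (hK : m < K) :
    win chars K (m + 1) = win chars K m ++ [chars[m]] := by
  unfold win
  have h1 : m + 1 - K = 0 := by omega
  have h2 : m - K = 0 := by omega
  rw [h1, h2, List.drop_zero, List.drop_zero, List.take_succ]
  simp [List.getElem?_eq_getElem hm]

theorem win_succ_ge (chars : List Char) (K m : Nat) (hm : m < chars.length) (hK : K ≤ m) :
    win chars K m ++ [chars[m]] = chars[m - K] :: win chars K (m + 1) := by
  unfold win
  have htake : chars.take (m + 1) = chars.take m ++ [chars[m]] := by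
    rw [List.take_succ, List.getElem?_eq_getElem hm]; rfl
  have hlen : (chars.take m).length = m := by rw [List.length_take]; omega
  have hlt : m - K < (chars.take (m + 1)).length := by rw [List.length_take]; omega
  have h2 : m + 1 - K = m - K + 1 := by omega
  rw [h2]
  calc (chars.take m).drop (m - K) ++ [chars[m]]
      = ((chars.take m) ++ [chars[m]]).drop (m - K) := by
        rw [List.drop_append_of_le_length (by omega)]
    _ = (chars.take (m + 1)).drop (m - K) := by rw [htake]
    _ = (chars.take (m + 1))[m - K] :: (chars.take (m + 1)).drop (m - K + 1) :=
        (List.getElem_cons_drop hlt).symm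
    _ = chars[m - K] :: (chars.take (m + 1)).drop (m - K + 1) := by
        rw [List.getElem_take]

-- B's slice at index m is exactly the window after processing m+1 chars
theorem slice_eq_win (chars : List Char) (K m : Nat) :
    PySem.List.slice chars (some (max 0 ((m : Int) - (K : Int) + 1))) (some ((m : Int) + 1))
      = win chars K (m + 1) := by
  have h1 : max 0 ((m : Int) - (K : Int) + 1) = ((m + 1 - K : Nat) : Int) := by
    push_cast; omega
  have h2 : (m : Int) + 1 = ((m + 1 : Nat) : Int) := by push_cast; ring
  rw [h1, h2, PySem.List.slice_natCast]
  unfold win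
  rw [List.drop_take]

-- main loop correspondence
theorem main_pv (chars : List Char) (K : Nat) :
    ∀ (n m : Nat), chars.length - m = n → m ≤ chars.length →
    ∀ (d : PySem.Dict Char Int), InvCC d (win chars K m) →
    aLoop chars (K : Int) (PySem.List.enumerate (chars.drop m) (m : Int)) d
      = bLoop chars (K : Int) (PySem.List.pyRange (m : Int) (chars.length : Int) 1) := by
  intro n
  induction n with
  | zero =>
    intro m hn hm d _
    have hme : m = chars.length := by omega
    subst hme
    rw [List.drop_length]
    rw [PySem.List.pyRange_one_eq_nil (by omega)]
    simp [aLoop, bLoop, PySem.List.enumerate]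
  | succ n ih =>
    intro m hn hm d hInv
    have hmlt : m < chars.length := by omega
    have hdrop : chars.drop m = chars[m] :: chars.drop (m + 1) :=
      (List.getElem_cons_drop hmlt).symm
    rw [hdrop]
    have henum : PySem.List.enumerate (chars[m] :: chars.drop (m + 1)) (m : Int)
        = ((m : Int), chars[m]) :: PySem.List.enumerate (chars.drop (m + 1)) ((m : Int) + 1) := by
      simp [PySem.List.enumerate]
    rw [henum]
    rw [PySem.List.pyRange_one_cons (by omega : (m : Int) < (chars.length : Int))]
    show (let d1 := aAdd d chars[m];
          let d2? : Option (PySem.Dict Char Int) :=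
            if (K : Int) ≤ (m : Int) then
              match PySem.List.pyGet? chars ((m : Int) - (K : Int)) with
              | none => none
              | some c => aRemove d1 c
            else some d1
          match d2? with
          | none => none
          | some d2 => if (d2.size : Int) = (K : Int) then some ((m : Int) + 1)
              else aLoop chars (K : Int) (PySem.List.enumerate (chars.drop (m + 1)) ((m : Int) + 1)) d2)
        = bLoop chars (K : Int) (((m : Int)) :: PySem.List.pyRange ((m : Int) + 1) (chars.length : Int) 1)
    have hAdd : InvCC (aAdd d chars[m]) (win chars K m ++ [chars[m]]) :=
      add_pres_pv d (win chars K m) chars[m] hInv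
    have hcast1 : ((m : Int) + 1) = ((m + 1 : Nat) : Int) := by push_cast; ring
    -- establish d2 and its invariant for both cases
    by_cases hK : K ≤ m
    · have hKi : (K : Int) ≤ (m : Int) := by exact_mod_cast hK
      have hidx : (m : Int) - (K : Int) = ((m - K : Nat) : Int) := by push_cast; omega
      have hrange : m - K < chars.length := by omega
      have hget : PySem.List.pyGet? chars ((m : Int) - (K : Int)) = some chars[m - K] := by
        rw [hidx, PySem.List.pyGet?_natCast]
        simp [List.getElem?_eq_getElem hrange]
      have hwin : win chars K m ++ [chars[m]] = chars[m - K] :: win chars K (m + 1) :=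
        win_succ_ge chars K m hmlt hK
      rw [hwin] at hAdd
      obtain ⟨d2, hrem, hInv2⟩ := remove_pres_pv _ chars[m - K] _ hAdd
      simp only [if_pos hKi, hget, hrem]
      have hsz : ((d2.size : Int) = (K : Int)) ↔ (((PySem.Set.ofList (win chars K (m + 1))).length : Int) = (K : Int)) := by
        rw [size_eq_pv d2 _ hInv2]
      show (if (d2.size : Int) = (K : Int) then some ((m : Int) + 1) else _) = bLoop _ _ _
      rw [bLoop]
      simp only [slice_eq_win chars K m]
      by_cases hc : ((PySem.Set.ofList (win chars K (m + 1))).length : Int) = (K : Int)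
      · rw [if_pos (hsz.mpr hc), if_pos hc]
      · rw [if_neg (fun h => hc (hsz.mp h)), if_neg hc]
        rw [hcast1]
        exact ih (m + 1) (by omega) (by omega) d2 hInv2
    · have hKi : ¬ ((K : Int) ≤ (m : Int)) := by exact_mod_cast hK
      rw [← win_succ_lt chars K m hmlt (by omega)] at hAdd
      simp only [if_neg hKi]
      have hsz : (((aAdd d chars[m]).size : Int) = (K : Int)) ↔ (((PySem.Set.ofList (win chars K (m + 1))).length : Int) = (K : Int)) := by
        rw [size_eq_pv _ _ hAdd]
      show (if ((aAdd d chars[m]).size : Int) = (K : Int) then some ((m : Int) + 1) else _) = bLoop _ _ _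
      rw [bLoop]
      simp only [slice_eq_win chars K m]
      by_cases hc : ((PySem.Set.ofList (win chars K (m + 1))).length : Int) = (K : Int)
      · rw [if_pos (hsz.mpr hc), if_pos hc]
      · rw [if_neg (fun h => hc (hsz.mp h)), if_neg hc]
        rw [hcast1]
        exact ih (m + 1) (by omega) (by omega) _ hAdd

-- ===== VERDICT (by name: the statement is the Claim_ definition above) =====
theorem FindDistinct_spec : Claim_equal_FindDistinct := by
  intro s k _ hpre
  unfold Spec_FindDistinct FindDistinct FindDistinct_alt
  rcases hpre with hs | hk
  · subst hs
    simp [aLoop, bLoop, PySem.List.enumerate, PySem.List.pyRange_one_eq_nil]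
  · have hk' : k = ((k.toNat : Nat) : Int) := (Int.toNat_of_nonneg hk).symm
    rw [hk']
    have hInv0 : InvCC PySem.Dict.empty (win s.toList k.toNat 0) :=
      ⟨by simp [PySem.Dict.keys, PySem.Dict.empty], fun x => by
        simp [win, PySem.Dict.get?, PySem.Dict.empty]⟩
    have := main_pv s.toList k.toNat (s.toList.length) 0 (by omega) (by omega)
      PySem.Dict.empty hInv0
    simp only [Nat.cast_zero, List.drop_zero] at this
    exact this
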